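-- pv_equiv track=rewrite | github.com/fennq/diverg | skills/recon/port_lists.py | parse_custom_port_list
-- ===== SOURCE A (Python) =====
-- def parse_custom_port_list(port_range: str) -> list[int] | None:
--     """
--     Parse a simple -p style list: "80,443", "22-25", "80,8080-8082".
--     Returns None if empty or invalid (caller should use nmap).
--     """
--     s = port_range.strip()
--     if not s or s.lower() in ("top10", "top100", "top1000"):
--         return None
--     out: list[int] = []
--     seen: set[int] = set()
--     for part in s.split(","):
--         part = part.strip()
--         if not part:
--             continue
--         if "-" in part:
--             a, b = part.split("-", 1)
--             try:
--                 lo, hi = int(a.strip()), int(b.strip())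
--             except ValueError:
--                 return None
--             if lo > hi or lo < 1 or hi > 65535:
--                 return None
--             for p in range(lo, hi + 1):
--                 if p not in seen:
--                     seen.add(p)
--                     out.append(p)
--         else:
--             try:
--                 p = int(part)
--             except ValueError:
--                 return None
--             if p < 1 or p > 65535:
--                 return None
--             if p not in seen:
--                 seen.add(p)
--                 out.append(p)
--     return out if out else None
-- ===== SOURCE B (Python) =====
-- def parse_custom_port_list(port_range):
--     """
--     Two-phase rewrite: first validate/collect (lo, hi) bounds per part (a single
--     port p becomes (p, p)), then expand everything and dedup once at the end
--     with dict.fromkeys instead of maintaining a seen-set inside the loop.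
--     """
--     s = port_range.strip()
--     if not s or s.lower() in ("top10", "top100", "top1000"):
--         return None
--     ranges = []
--     for part in s.split(","):
--         part = part.strip()
--         if not part:
--             continue
--         if "-" in part:
--             a, b = part.split("-", 1)
--             try:
--                 lo, hi = int(a.strip()), int(b.strip())
--             except ValueError:
--                 return None
--         else:
--             try:
--                 lo = hi = int(part)
--             except ValueError:
--                 return None
--         if lo > hi or lo < 1 or hi > 65535:
--             return None
--         ranges.append((lo, hi))
--     result = list(dict.fromkeys(p for lo, hi in ranges for p in range(lo, hi + 1)))
--     return result if result else None
-- ===== Notes on version B (the rewrite author's own statement) =====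
-- stated objective: alternative
-- what changed: B separates parsing from expansion: the loop only validates and collects (lo, hi) bounds (a single port becomes (p, p), sharing one unified bounds check), and the ports are expanded and first-occurrence-deduped in one final dict.fromkeys pass instead of maintaining a seen-set inside the loop.
import Mathlib
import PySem

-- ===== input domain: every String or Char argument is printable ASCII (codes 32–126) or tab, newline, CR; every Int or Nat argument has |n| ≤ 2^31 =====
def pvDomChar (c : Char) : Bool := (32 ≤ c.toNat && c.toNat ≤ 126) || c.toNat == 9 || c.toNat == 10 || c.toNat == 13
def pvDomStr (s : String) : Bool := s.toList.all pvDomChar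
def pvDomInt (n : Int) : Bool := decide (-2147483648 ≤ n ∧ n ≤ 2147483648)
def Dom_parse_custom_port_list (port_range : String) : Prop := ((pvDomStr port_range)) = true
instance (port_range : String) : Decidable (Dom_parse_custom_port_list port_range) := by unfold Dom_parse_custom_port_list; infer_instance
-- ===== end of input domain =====

-- B restructures A into two phases — collect validated (lo, hi) bounds, then expand and
-- dedup once at the end via dict.fromkeys — instead of deduping with a seen-set inside the loop.


-- ===== PORT A =====
-- the body of A's inner 'if p not in seen: seen.add(p); out.append(p)'
def pvAStep (st : List Int × PySem.Set Int) (p : Int) : List Int × PySem.Set Int :=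
  if PySem.Set.contains st.2 p then st else (st.1 ++ [p], PySem.Set.add st.2 p)

-- A's 'for part in s.split(",")' loop (early 'return None' = none)
def pvAGo : List String → List Int → PySem.Set Int → Option (List Int)
  | [], out, _ => some out
  | part :: rest, out, seen =>
    let part := PySem.Str.strip part
    if part = "" then pvAGo rest out seen
    else if PySem.Str.isIn "-" part then
      match PySem.Str.splitMax? part "-" 1 with
      | some [a, b] =>
        match PySem.Int.ofStr? (PySem.Str.strip a), PySem.Int.ofStr? (PySem.Str.strip b) with
        | some lo, some hi =>
          if lo > hi ∨ lo < 1 ∨ hi > 65535 then none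
          else
            let st := (PySem.List.pyRange lo (hi + 1) 1).foldl pvAStep (out, seen)
            pvAGo rest st.1 st.2
        | _, _ => none
      | _ => none  -- unreachable: "-" ∈ part guarantees two pieces
    else
      match PySem.Int.ofStr? part with
      | some p =>
        if p < 1 ∨ p > 65535 then none
        else if PySem.Set.contains seen p then pvAGo rest out seen
        else pvAGo rest (out ++ [p]) (PySem.Set.add seen p)
      | none => none

def parse_custom_port_list (port_range : String) : Option (List Int) :=
  let s := PySem.Str.strip port_range
  if s = "" ∨ PySem.Str.lower s ∈ ["top10", "top100", "top1000"] then none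
  else
    match pvAGo ((PySem.Str.split? s ",").getD []) [] PySem.Set.empty with
    | none => none
    | some out => if out = [] then none else some out

-- ===== PORT B =====
-- B's loop: collect validated (lo, hi) bounds per part
def pvBParse : List String → Option (List (Int × Int))
  | [] => some []
  | part :: rest =>
    let part := PySem.Str.strip part
    if part = "" then pvBParse rest
    else
      let bounds : Option (Int × Int) :=
        if PySem.Str.isIn "-" part then
          match PySem.Str.splitMax? part "-" 1 with
          | some [a, b] =>
            match PySem.Int.ofStr? (PySem.Str.strip a), PySem.Int.ofStr? (PySem.Str.strip b) with
            | some lo, some hi => some (lo, hi)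
            | _, _ => none
          | _ => none  -- unreachable: "-" ∈ part guarantees two pieces
        else
          match PySem.Int.ofStr? part with
          | some p => some (p, p)
          | none => none
      match bounds with
      | none => none
      | some (lo, hi) =>
        if lo > hi ∨ lo < 1 ∨ hi > 65535 then none
        else (pvBParse rest).map ((lo, hi) :: ·)

def parse_custom_port_list_alt (port_range : String) : Option (List Int) :=
  let s := PySem.Str.strip port_range
  if s = "" ∨ PySem.Str.lower s ∈ ["top10", "top100", "top1000"] then none
  else
    match pvBParse ((PySem.Str.split? s ",").getD []) with
    | none => none
    | some ranges =>
      -- list(dict.fromkeys(p for lo, hi in ranges for p in range(lo, hi + 1)))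
      let result := PySem.List.dedup
        (ranges.flatMap (fun r => PySem.List.pyRange r.1 (r.2 + 1) 1))
      if result = [] then none else some result

-- ===== PRECONDITION & SPEC =====
def Spec_parse_custom_port_list (port_range : String) (out : Option (List Int)) : Prop := out = parse_custom_port_list_alt port_range
instance (port_range : String) (out : Option (List Int)) : Decidable (Spec_parse_custom_port_list port_range out) := by unfold Spec_parse_custom_port_list; infer_instance

-- ===== CLAIM (what is proved, stated in full; the proofs are below) =====
def Claim_equal_parse_custom_port_list : Prop := ∀ (port_range : String), Dom_parse_custom_port_list port_range → Spec_parse_custom_port_list port_range (parse_custom_port_list port_range)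

-- ===== LEMMAS AND PROOFS =====

-- A's inner dedup loop, started with out = seen, is elementwise PySem.Set.add (Set.update)
lemma pvAStep_fold (xs : List Int) : ∀ (o : PySem.Set Int),
    xs.foldl pvAStep (o, o) = (PySem.Set.update o xs, PySem.Set.update o xs) := by
  induction xs with
  | nil => intro o; simp [PySem.Set.update]
  | cons p xs ih =>
    intro o
    by_cases h : p ∈ o
    · simpa [pvAStep, PySem.Set.add, PySem.Set.update, PySem.Set.contains, h] using ih o
    · simpa [pvAStep, PySem.Set.add, PySem.Set.update, PySem.Set.contains, h] using ih (o ++ [p])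

lemma pvGo_eq (parts : List String) : ∀ (o : PySem.Set Int),
    pvAGo parts o o = (pvBParse parts).map
      (fun rs => PySem.Set.update o
        (rs.flatMap (fun r => PySem.List.pyRange r.1 (r.2 + 1) 1))) := by
  induction parts with
  | nil => intro o; simp [pvAGo, pvBParse, PySem.Set.update]
  | cons part rest ih =>
    intro o
    simp only [pvAGo, pvBParse]
    by_cases hemp : PySem.Str.strip part = ""
    · simp [hemp, ih o]
    · simp only [hemp, if_false]
      by_cases hdash : PySem.Str.isIn "-" (PySem.Str.strip part)
      · simp only [hdash, if_true]
        match hsp : PySem.Str.splitMax? (PySem.Str.strip part) "-" 1 with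
        | none => simp
        | some [] => simp
        | some [a] => simp
        | some (a :: b :: c :: t) => simp
        | some [a, b] =>
          cases ha : PySem.Int.ofStr? (PySem.Str.strip a) with
          | none => simp [ha]
          | some lo =>
            cases hb2 : PySem.Int.ofStr? (PySem.Str.strip b) with
            | none => simp [ha, hb2]
            | some hi =>
              simp only [ha, hb2]
              by_cases hg : lo > hi ∨ lo < 1 ∨ hi > 65535
              · simp [hg]
              · simp only [hg, if_false]
                rw [pvAStep_fold]
                rw [ih (PySem.Set.update o (PySem.List.pyRange lo (hi + 1) 1))]
                cases pvBParse rest <;>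
                  simp [PySem.Set.update, List.foldl_append]
      · simp only [hdash, Bool.false_eq_true, if_false]
        cases hp : PySem.Int.ofStr? (PySem.Str.strip part) with
        | none => simp
        | some p =>
          by_cases hb : p < 1 ∨ p > 65535
          · simp [hb]
          · have hg : ¬ (p > p ∨ p < 1 ∨ p > 65535) := by omega
            simp only [hb, if_false]
            by_cases hseen : p ∈ o
            · have hc : PySem.Set.contains o p = true := by
                simpa [PySem.Set.contains] using hseen
              rw [if_pos hc, ih o]
              cases pvBParse rest <;>
                simp [PySem.List.pyRange_one_singleton, PySem.Set.update, PySem.Set.add, hseen]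
            · have hc : ¬ PySem.Set.contains o p = true := by
                simpa [PySem.Set.contains] using hseen
              rw [if_neg hc]
              have hadd : PySem.Set.add o p = o ++ [p] := by
                simp [PySem.Set.add, PySem.Set.contains, hseen]
              rw [hadd, ih (o ++ [p])]
              cases pvBParse rest <;>
                simp [PySem.List.pyRange_one_singleton, PySem.Set.update, PySem.Set.add, hseen]

-- ===== VERDICT (by name: the statement is the Claim_ definition above) =====
theorem parse_custom_port_list_spec : Claim_equal_parse_custom_port_list := by
  intro port_range _
  unfold Spec_parse_custom_port_list parse_custom_port_list parse_custom_port_list_alt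
  by_cases h : PySem.Str.strip port_range = "" ∨
      PySem.Str.lower (PySem.Str.strip port_range) ∈ ["top10", "top100", "top1000"]
  · rw [if_pos h, if_pos h]
  · rw [if_neg h, if_neg h]
    rw [show (PySem.Set.empty : PySem.Set Int) = [] from rfl, pvGo_eq]
    cases pvBParse ((PySem.Str.split? (PySem.Str.strip port_range) ",").getD []) <;>
      simp [PySem.Set.update, PySem.Set.ofList_eq_foldl]
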